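-- pv_equiv track=rewrite | github.com/AlSakharoB/easy_list_v1 | ft_same_parts_list.py | ft_same_parts_list
-- ===== SOURCE A (Python) =====
-- def ft_len_mass(mass):
--     count = 0
--     for i in mass:
--         count += 1
--     return count
--
-- def ft_same_parts_list(mass):
--     count = 1
--     for i in range(ft_len_mass(mass) - 1):
--         if mass[i] >= 0 and mass[i + 1] >= 0:
--             return True
--         if mass[i] < 0 and mass[i + 1] < 0:
--             return True
--     return False
-- ===== SOURCE B (Python) =====
-- def ft_same_parts_list(mass):
--     # A list has an adjacent same-sign pair iff its signs do NOT follow the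
--     # strictly alternating pattern predicted from the first element's sign by
--     # index parity; B checks each element against that parity prediction.
--     n = len(mass)
--     if n < 2:
--         return False
--     first = mass[0] >= 0
--     return not all((mass[i] >= 0) == (first == (i % 2 == 0)) for i in range(n))
-- ===== Notes on version B (the rewrite author's own statement) =====
-- stated objective: alternative
-- what changed: B never compares neighbouring elements: it checks every element's sign against the parity-predicted strictly-alternating pattern fixed by the first element's sign, and returns True iff that global pattern test fails, replacing A's hand-counted length and early-return adjacent-pair scan.
import Mathlib
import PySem

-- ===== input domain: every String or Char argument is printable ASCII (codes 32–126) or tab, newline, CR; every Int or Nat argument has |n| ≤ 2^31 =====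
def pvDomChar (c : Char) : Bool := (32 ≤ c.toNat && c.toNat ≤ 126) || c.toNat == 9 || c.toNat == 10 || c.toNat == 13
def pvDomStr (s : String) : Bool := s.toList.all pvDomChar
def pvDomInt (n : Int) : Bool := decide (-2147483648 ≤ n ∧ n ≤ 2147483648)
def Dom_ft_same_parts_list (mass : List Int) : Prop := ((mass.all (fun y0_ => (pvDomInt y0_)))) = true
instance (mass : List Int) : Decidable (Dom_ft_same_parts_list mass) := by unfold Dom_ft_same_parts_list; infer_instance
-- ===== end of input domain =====

-- B replaces A's adjacent-pair early-return scan by a global test of each element's sign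
-- against the parity-predicted alternating pattern from the first element (objective: alternative).

-- ===== PORT A =====
-- ft_len_mass: count += 1 per element
def ftLenMass (mass : List Int) : Int := mass.foldl (fun count _ => count + 1) 0

-- the for-loop over range(len-1) with early returns; mass[i] is always in range here,
-- so the total pyGetD (default never used) is exact
def ftSamePartsLoop (mass : List Int) : List Int → Bool
  | [] => false
  | i :: rest =>
    if PySem.List.pyGetD mass i 0 ≥ 0 ∧ PySem.List.pyGetD mass (i + 1) 0 ≥ 0 then true
    else if PySem.List.pyGetD mass i 0 < 0 ∧ PySem.List.pyGetD mass (i + 1) 0 < 0 then true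
    else ftSamePartsLoop mass rest

def ft_same_parts_list (mass : List Int) : Bool :=
  ftSamePartsLoop mass (PySem.List.pyRange 0 (ftLenMass mass - 1))

-- ===== PORT B =====
-- Source B's all(... for i in range(n)); every mass[i] is in range, so pyGetD is exact
def ftAltAll (mass : List Int) (first : Bool) : Bool :=
  (List.range mass.length).all
    (fun i => (decide (PySem.List.pyGetD mass (i : Int) 0 ≥ 0)) == (first == decide (i % 2 == 0)))

def ft_same_parts_list_alt (mass : List Int) : Bool :=
  if mass.length < 2 then false
  else ! ftAltAll mass (decide (PySem.List.pyGetD mass 0 0 ≥ 0))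

-- ===== PRECONDITION & SPEC =====
def Spec_ft_same_parts_list (mass : List Int) (out : Bool) : Prop := out = ft_same_parts_list_alt mass
instance (mass : List Int) (out : Bool) : Decidable (Spec_ft_same_parts_list mass out) := by unfold Spec_ft_same_parts_list; infer_instance

-- ===== CLAIM (what is proved, stated in full; the proofs are below) =====
def Claim_equal_ft_same_parts_list : Prop := ∀ (mass : List Int), Dom_ft_same_parts_list mass → Spec_ft_same_parts_list mass (ft_same_parts_list mass)

-- ===== LEMMAS AND PROOFS =====

-- adjacency-any: the common characterisation both ports are reduced to
def adjAny (bs : List Bool) : Bool := (bs.zip bs.tail).any (fun p => p.1 == p.2)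

-- structural form of B's parity test on the sign list
def goodB : List Bool → Bool → Bool
  | [], _ => true
  | b :: t, f => (b == f) && goodB t (!f)

theorem ftLenMass_go (xs : List Int) (n : Int) :
    xs.foldl (fun count _ => count + 1) n = n + xs.length := by
  induction xs generalizing n with
  | nil => simp
  | cons x xs ih =>
    rw [List.foldl_cons, ih]
    simp only [List.length_cons]
    push_cast
    ring

theorem ftLenMass_eq (xs : List Int) : ftLenMass xs = (xs.length : Int) := by
  simp [ftLenMass, ftLenMass_go]

-- shifting all indices by one drops the head of the list being indexed
theorem loop_shift (x : Int) (xs : List Int) (l : List Nat) :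
    ftSamePartsLoop (x :: xs) (l.map (fun k : Nat => (k : Int) + 1))
      = ftSamePartsLoop xs (l.map (fun k : Nat => (k : Int))) := by
  induction l with
  | nil => rfl
  | cons k l ih =>
    have h1 : (k : Int) + 1 = ((k + 1 : Nat) : Int) := by push_cast; ring
    have h2 : ((k + 1 : Nat) : Int) + 1 = ((k + 2 : Nat) : Int) := by push_cast; ring
    simp only [List.map, ftSamePartsLoop, h1, h2, PySem.List.pyGetD_natCast]
    simp only [List.getD_cons_succ]
    rw [ih]

theorem range_shift (m : Nat) :
    (List.range (m + 1)).map (fun k : Nat => (k : Int))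
      = 0 :: (List.range m).map (fun k : Nat => (k : Int) + 1) := by
  induction m with
  | zero => rfl
  | succ m ih =>
    rw [List.range_succ, List.map_append, ih, List.range_succ, List.map_append]
    simp

-- A computes adjacency-any over the sign list
theorem a_eq_adjAny (mass : List Int) :
    ft_same_parts_list mass = adjAny (mass.map (fun x => decide (x ≥ 0))) := by
  induction mass with
  | nil => rfl
  | cons x xs ih =>
    cases xs with
    | nil => rfl
    | cons y rest =>
      have hlen : ftLenMass (x :: y :: rest) - 1 = ((rest.length + 1 : Nat) : Int) := by
        rw [ftLenMass_eq]; simp only [List.length_cons]; push_cast; ring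
      have hlen' : ftLenMass (y :: rest) - 1 = ((rest.length : Nat) : Int) := by
        rw [ftLenMass_eq]; simp only [List.length_cons]; push_cast; ring
      rw [ft_same_parts_list, hlen, PySem.List.pyRange_zero_natCast, range_shift,
        ftSamePartsLoop]
      rw [show ((0 : Int) + 1) = ((1 : Nat) : Int) by norm_num]
      simp only [PySem.List.pyGetD_natCast, PySem.List.pyGetD_ofNat', List.getD_cons_zero,
        List.getD_cons_succ]
      rw [loop_shift, ← PySem.List.pyRange_zero_natCast, ← hlen', ← ft_same_parts_list, ih]
      simp only [adjAny, List.map, List.tail, List.zip, List.zipWith, List.any_cons]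
      by_cases hx : x ≥ 0 <;> by_cases hy : y ≥ 0 <;>
        simp [hx, hy] <;> omega

-- B's range-indexed parity test equals the structural goodB on the sign list
theorem ftAltAll_eq_goodB (mass : List Int) (f : Bool) :
    ftAltAll mass f = goodB (mass.map (fun x => decide (x ≥ 0))) f := by
  induction mass generalizing f with
  | nil => rfl
  | cons x xs ih =>
    simp only [ftAltAll, List.length_cons, List.range_succ_eq_map, List.all_cons,
      List.all_map, List.map, goodB, PySem.List.pyGetD_natCast, List.getD_cons_zero,
      Function.comp_def, List.getD_cons_succ]
    congr 1
    · simp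
    · rw [← ih (!f)]
      simp only [ftAltAll, PySem.List.pyGetD_natCast]
      apply congrArg
      funext i
      have hpar : decide ((i + 1) % 2 == 0) = ! decide (i % 2 == 0) := by
        rcases Nat.mod_two_eq_zero_or_one i with h | h <;> simp [Nat.add_mod, h]
      rw [hpar]
      cases f <;> cases decide (i % 2 == 0) <;> rfl

-- on a nonempty sign list, failing goodB (seeded with the head) is adjacency-any
theorem adjAny_eq_not_goodB (b : Bool) (t : List Bool) :
    adjAny (b :: t) = ! goodB (b :: t) b := by
  induction t generalizing b with
  | nil => cases b <;> rfl
  | cons c t ih =>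
    simp only [adjAny, goodB, List.tail, List.zip, List.zipWith, List.any_cons] at *
    cases b <;> cases c <;> simp_all

theorem main_eq (mass : List Int) : ft_same_parts_list mass = ft_same_parts_list_alt mass := by
  cases mass with
  | nil => rfl
  | cons x xs =>
    cases xs with
    | nil => rfl
    | cons y rest =>
      have hlen : ¬ (x :: y :: rest).length < 2 := by simp
      rw [ft_same_parts_list_alt, if_neg hlen, a_eq_adjAny, ftAltAll_eq_goodB]
      have h0 : PySem.List.pyGetD (x :: y :: rest) 0 0 = x := by
        simp [PySem.List.pyGetD_ofNat']
      rw [h0]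
      exact adjAny_eq_not_goodB _ _

-- ===== VERDICT (by name: the statement is the Claim_ definition above) =====
theorem ft_same_parts_list_spec : Claim_equal_ft_same_parts_list := by
  intro mass _
  show _ = _
  exact main_eq mass
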